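-- pv_equiv track=rewrite | github.com/miemie2013/miemienet | gen_code.py | elem_get_out_index
-- ===== SOURCE A (Python) =====
-- def elem_get_out_index(d, D, shape1, shape2):
--     real_shape = []
--     real_i = []
--     p = 0
--     for s1 in shape1:
--         s2 = shape2[p]
--         if s1 != '1' or s2 != '1':
--             real_shape.append(D[p])
--             real_i.append(d[p])
--         p += 1
--
--     if len(real_shape) == 4:
--         _index = '((%s * %s + %s) * %s + %s) * %s + %s' % (real_i[0], real_shape[1], real_i[1], real_shape[2], real_i[2], real_shape[3], real_i[3])
--     elif len(real_shape) == 3: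
--         _index = '(%s * %s + %s) * %s + %s' % (real_i[0], real_shape[1], real_i[1], real_shape[2], real_i[2])
--     elif len(real_shape) == 2:
--         _index = '%s * %s + %s' % (real_i[0], real_shape[1], real_i[1])
--     elif len(real_shape) == 1:
--         _index = '%s' % (real_i[0], )
--     elif len(real_shape) == 0:
--         _index = '0'
--     return _index
-- ===== SOURCE B (Python) =====
-- def elem_get_out_index(d, D, shape1, shape2):
--     # Horner fold over the kept indices instead of four hardcoded length branches.
--     kept = [p for p, (s1, s2) in enumerate(zip(shape1, shape2)) if s1 != '1' or s2 != '1']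
--     if not kept:
--         return '0'
--     expr = d[kept[0]]
--     for j, k in enumerate(kept[1:]):
--         left = expr if j == 0 else '(%s)' % expr
--         expr = '%s * %s + %s' % (left, D[k], d[k])
--     return expr
-- ===== Notes on version B (the rewrite author's own statement) =====
-- stated objective: simpler
-- what changed: B selects the kept axis indices with one zip/enumerate comprehension and builds the flat-index string with a single Horner fold (parenthesising the accumulator after the first step), replacing A's two parallel accumulator lists and four hardcoded length-specific format branches; it works for any number of kept axes instead of exactly 0-4.
import Mathlib
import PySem

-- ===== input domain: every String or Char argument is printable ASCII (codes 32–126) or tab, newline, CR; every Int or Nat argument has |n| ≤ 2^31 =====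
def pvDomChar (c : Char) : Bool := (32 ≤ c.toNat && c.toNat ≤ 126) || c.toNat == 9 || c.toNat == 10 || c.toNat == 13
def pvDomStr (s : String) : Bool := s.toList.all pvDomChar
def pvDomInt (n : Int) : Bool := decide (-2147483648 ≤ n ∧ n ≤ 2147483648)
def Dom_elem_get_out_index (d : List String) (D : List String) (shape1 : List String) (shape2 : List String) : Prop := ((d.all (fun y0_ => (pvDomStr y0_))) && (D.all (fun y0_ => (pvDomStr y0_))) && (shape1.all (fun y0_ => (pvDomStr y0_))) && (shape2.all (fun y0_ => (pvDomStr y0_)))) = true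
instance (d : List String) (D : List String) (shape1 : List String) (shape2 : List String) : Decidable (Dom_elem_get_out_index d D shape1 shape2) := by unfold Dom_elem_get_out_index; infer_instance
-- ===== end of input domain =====

-- B replaces A's four hardcoded length-specific format branches by a single Horner fold
-- over the kept indices, selected by one zip/enumerate comprehension (objective: simpler).

-- ===== PORT A =====
-- the final if/elif chain of A; none = the UnboundLocalError branch (len > 4)
def elemA_fmt (rs ri : List String) : Option String :=
  if rs.length == 4 then
    (PySem.List.pyGet? ri 0).bind fun i0 =>
    (PySem.List.pyGet? rs 1).bind fun S1 =>
    (PySem.List.pyGet? ri 1).bind fun i1 =>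
    (PySem.List.pyGet? rs 2).bind fun S2 =>
    (PySem.List.pyGet? ri 2).bind fun i2 =>
    (PySem.List.pyGet? rs 3).bind fun S3 =>
    (PySem.List.pyGet? ri 3).bind fun i3 =>
    some ("((" ++ i0 ++ " * " ++ S1 ++ " + " ++ i1 ++ ") * " ++ S2 ++ " + " ++ i2 ++ ") * " ++ S3 ++ " + " ++ i3)
  else if rs.length == 3 then
    (PySem.List.pyGet? ri 0).bind fun i0 =>
    (PySem.List.pyGet? rs 1).bind fun S1 =>
    (PySem.List.pyGet? ri 1).bind fun i1 =>
    (PySem.List.pyGet? rs 2).bind fun S2 =>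
    (PySem.List.pyGet? ri 2).bind fun i2 =>
    some ("(" ++ i0 ++ " * " ++ S1 ++ " + " ++ i1 ++ ") * " ++ S2 ++ " + " ++ i2)
  else if rs.length == 2 then
    (PySem.List.pyGet? ri 0).bind fun i0 =>
    (PySem.List.pyGet? rs 1).bind fun S1 =>
    (PySem.List.pyGet? ri 1).bind fun i1 =>
    some (i0 ++ " * " ++ S1 ++ " + " ++ i1)
  else if rs.length == 1 then
    PySem.List.pyGet? ri 0
  else if rs.length == 0 then
    some "0"
  else
    none

-- A's filtering loop over shape1 with running index p; none = IndexError
def elemA_go (d D shape2 : List String) : List String → Int → List String → List String → Option (List String × List String)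
  | [], _, rs, ri => some (rs, ri)
  | s1 :: rest, p, rs, ri =>
    (PySem.List.pyGet? shape2 p).bind fun s2 =>
      if s1 != "1" || s2 != "1" then
        (PySem.List.pyGet? D p).bind fun Dp =>
        (PySem.List.pyGet? d p).bind fun dp =>
        elemA_go d D shape2 rest (p + 1) (rs ++ [Dp]) (ri ++ [dp])
      else elemA_go d D shape2 rest (p + 1) rs ri

def elem_get_out_index (d : List String) (D : List String) (shape1 : List String) (shape2 : List String) : String :=
  ((elemA_go d D shape2 shape1 0 [] []).bind fun acc => elemA_fmt acc.1 acc.2).getD ""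

-- ===== PORT B =====
-- the Horner fold of Source B: j counts completed steps (parentheses from the second step on)
def elemB_horner (d D : List String) : List Int → String → Nat → Option String
  | [], expr, _ => some expr
  | k :: ks, expr, j =>
    (PySem.List.pyGet? D k).bind fun Dk =>
    (PySem.List.pyGet? d k).bind fun dk =>
    elemB_horner d D ks ((if j == 0 then expr else "(" ++ expr ++ ")") ++ " * " ++ Dk ++ " + " ++ dk) (j + 1)

def elem_get_out_index_alt (d : List String) (D : List String) (shape1 : List String) (shape2 : List String) : String :=
  let kept : List Int :=
    ((PySem.List.enumerate (shape1.zip shape2) 0).filter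
      (fun x => x.2.1 != "1" || x.2.2 != "1")).map (·.1)
  match kept with
  | [] => "0"
  | k0 :: ks => ((PySem.List.pyGet? d k0).bind fun e0 => elemB_horner d D ks e0 0).getD ""

-- ===== PRECONDITION & SPEC =====
-- Pre_ holds exactly where Python A returns: shape2 must cover shape1 (else IndexError),
-- every kept index must be in range of d and D (else IndexError), and at most 4 axes may
-- be kept (else _index is unbound: UnboundLocalError).
def Pre_elem_get_out_index (d : List String) (D : List String) (shape1 : List String) (shape2 : List String) : Prop :=
  shape1.length ≤ shape2.length ∧
  (∀ p, p < shape1.length → ¬(shape1.getD p "" = "1" ∧ shape2.getD p "" = "1") →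
    p < d.length ∧ p < D.length) ∧
  ((shape1.zip shape2).filter (fun x => !(x.1 == "1" && x.2 == "1"))).length ≤ 4

instance (d : List String) (D : List String) (shape1 : List String) (shape2 : List String) : Decidable (Pre_elem_get_out_index d D shape1 shape2) := by
  unfold Pre_elem_get_out_index; infer_instance

def pvWitness_elem_get_out_index : List String × List String × List String × List String :=
  (["i0", "i1"], ["D0", "D1"], ["2", "3"], ["2", "3"])

def Spec_elem_get_out_index (d : List String) (D : List String) (shape1 : List String) (shape2 : List String) (out : String) : Prop := out = elem_get_out_index_alt d D shape1 shape2
instance (d : List String) (D : List String) (shape1 : List String) (shape2 : List String) (out : String) : Decidable (Spec_elem_get_out_index d D shape1 shape2 out) := by unfold Spec_elem_get_out_index; infer_instance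

-- ===== CLAIM (what is proved, stated in full; the proofs are below) =====
def Claim_equal_elem_get_out_index : Prop := ∀ (d : List String) (D : List String) (shape1 : List String) (shape2 : List String), Dom_elem_get_out_index d D shape1 shape2 → Pre_elem_get_out_index d D shape1 shape2 → Spec_elem_get_out_index d D shape1 shape2 (elem_get_out_index d D shape1 shape2)

-- ===== LEMMAS AND PROOFS =====

-- the list of kept (flat) indices, offset t: common characterisation of both ports
def kf : List (String × String) → Nat → List Int
  | [], _ => []
  | (s1, s2) :: rest, t =>
    if s1 != "1" || s2 != "1" then (t : Int) :: kf rest (t + 1) else kf rest (t + 1)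

lemma kf_eq_filter_enumerate : ∀ (l : List (String × String)) (t : Nat),
    ((PySem.List.enumerate l (t : Int)).filter (fun x => x.2.1 != "1" || x.2.2 != "1")).map (·.1)
      = kf l t := by
  intro l
  induction l with
  | nil => intro t; simp [PySem.List.enumerate, kf]
  | cons hd tl ih =>
    intro t
    obtain ⟨s1, s2⟩ := hd
    simp only [PySem.List.enumerate_cons, List.filter_cons, kf]
    have hc1 : ((t : Int)) + 1 = ((t + 1 : Nat) : Int) := by push_cast; ring
    by_cases h : (s1 != "1" || s2 != "1") = true
    · simp only [h, if_true, List.map_cons]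
      rw [hc1, ih]
    · simp only [h, if_false, Bool.false_eq_true]
      rw [hc1, ih]

lemma kf_length : ∀ (l : List (String × String)) (t : Nat),
    (kf l t).length = (l.filter (fun x => !(x.1 == "1" && x.2 == "1"))).length := by
  intro l
  induction l with
  | nil => intro t; simp [kf]
  | cons hd tl ih =>
    intro t
    obtain ⟨s1, s2⟩ := hd
    simp only [kf, List.filter_cons]
    by_cases h1 : s1 = "1" <;> by_cases h2 : s2 = "1" <;> simp [h1, h2, ih]

lemma kf_mem : ∀ (l : List (String × String)) (t : Nat) (q : Int), q ∈ kf l t →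
    ∃ i : Nat, q = (i : Int) ∧ t ≤ i ∧ ∃ h : i - t < l.length,
      ¬(l[i - t].1 = "1" ∧ l[i - t].2 = "1") := by
  intro l
  induction l with
  | nil => intro t q hq; simp [kf] at hq
  | cons hd tl ih =>
    intro t q hq
    obtain ⟨s1, s2⟩ := hd
    simp only [kf] at hq
    by_cases h : (s1 != "1" || s2 != "1") = true
    · rw [if_pos h] at hq
      rcases List.mem_cons.mp hq with h0 | h0
      · refine ⟨t, h0, le_refl _, by simp, ?_⟩
        simp only [Nat.sub_self]
        intro hc
        simp only [List.getElem_cons_zero] at hc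
        have h' : ¬s1 = "1" ∨ ¬s2 = "1" := by simpa using h
        rcases h' with h | h
        · exact h hc.1
        · exact h hc.2
      · obtain ⟨i, rfl, hti, hlt, hpred⟩ := ih (t + 1) q h0
        refine ⟨i, rfl, by omega, by simp; omega, ?_⟩
        have : i - t = (i - (t + 1)) + 1 := by omega
        simpa [this] using hpred
    · rw [if_neg h] at hq
      obtain ⟨i, rfl, hti, hlt, hpred⟩ := ih (t + 1) q hq
      refine ⟨i, rfl, by omega, by simp; omega, ?_⟩
      have : i - t = (i - (t + 1)) + 1 := by omega
      simpa [this] using hpred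

lemma elemA_go_spec (d D shape2 : List String) : ∀ (l1 : List String) (t : Nat) (rs ri : List String),
    l1.length + t ≤ shape2.length →
    (∀ q ∈ kf (l1.zip (shape2.drop t)) t, q.toNat < d.length ∧ q.toNat < D.length) →
    elemA_go d D shape2 l1 (t : Int) rs ri =
      some (rs ++ (kf (l1.zip (shape2.drop t)) t).map (fun q => D.getD q.toNat ""),
            ri ++ (kf (l1.zip (shape2.drop t)) t).map (fun q => d.getD q.toNat "")) := by
  intro l1
  induction l1 with
  | nil => intro t rs ri _ _; simp [elemA_go, kf]
  | cons s1 rest ih =>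
    intro t rs ri hlen hb
    have ht2 : t < shape2.length := by simp at hlen; omega
    have hdrop : shape2.drop t = shape2[t] :: shape2.drop (t + 1) := List.drop_eq_getElem_cons ht2
    have hget2 : PySem.List.pyGet? shape2 (t : Int) = some shape2[t] := by
      simp [List.getElem?_eq_getElem ht2]
    have hc1 : ((t : Int)) + 1 = ((t + 1 : Nat) : Int) := by push_cast; ring
    rw [hdrop] at hb ⊢
    simp only [List.zip_cons_cons, kf] at hb ⊢
    by_cases h : (s1 != "1" || shape2[t] != "1") = true
    · simp only [h, if_true] at hb ⊢
      have hbt := hb (t : Int) (List.mem_cons_self)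
      simp only [Int.toNat_natCast] at hbt
      have hgd : PySem.List.pyGet? d (t : Int) = some d[t] := by
        simp [List.getElem?_eq_getElem hbt.1]
      have hgD : PySem.List.pyGet? D (t : Int) = some D[t] := by
        simp [List.getElem?_eq_getElem hbt.2]
      rw [elemA_go, hget2, Option.bind_some, if_pos h, hgD, Option.bind_some, hgd,
        Option.bind_some, hc1, ih (t + 1) (rs ++ [D[t]]) (ri ++ [d[t]])
          (by simp at hlen ⊢; omega)
          (fun q hq => hb q (List.mem_cons_of_mem _ hq))]
      have hDg : D.getD ((t : Int)).toNat "" = D[t] := by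
        simp [List.getD_eq_getElem?_getD, List.getElem?_eq_getElem hbt.2]
      have hdg : d.getD ((t : Int)).toNat "" = d[t] := by
        simp [List.getD_eq_getElem?_getD, List.getElem?_eq_getElem hbt.1]
      simp [List.getElem?_eq_getElem hbt.1, List.getElem?_eq_getElem hbt.2]
    · simp only [h, if_false, Bool.false_eq_true] at hb ⊢
      rw [elemA_go, hget2, Option.bind_some, if_neg h, hc1]
      exact ih (t + 1) rs ri (by simp at hlen ⊢; omega) hb

lemma str_merge_paren (x : String) : "(" ++ ("(" ++ x) = "((" ++ x := by
  rw [← String.append_assoc]; rfl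

-- ===== VERDICT (by name: the statement is the Claim_ definition above) =====
theorem elem_get_out_index_spec : Claim_equal_elem_get_out_index := by
  intro d D shape1 shape2 _ hpre
  obtain ⟨h1, h2, h3⟩ := hpre
  unfold Spec_elem_get_out_index
  have hmemf : ∀ q ∈ kf (shape1.zip shape2) 0, ∃ i : Nat,
      q = (i : Int) ∧ i < d.length ∧ i < D.length := by
    intro q hq
    obtain ⟨i, rfl, -, hlt, hpred⟩ := kf_mem _ 0 q hq
    simp only [Nat.sub_zero] at hlt hpred
    have hi1 : i < shape1.length := by
      rw [List.length_zip] at hlt; omega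
    have hi2 : i < shape2.length := by
      rw [List.length_zip] at hlt; omega
    refine ⟨i, rfl, h2 i hi1 ?_⟩
    rw [List.getD_eq_getElem?_getD, List.getElem?_eq_getElem hi1,
      List.getD_eq_getElem?_getD, List.getElem?_eq_getElem hi2]
    simpa [List.getElem_zip] using hpred
  have hb : ∀ q ∈ kf (shape1.zip shape2) 0, q.toNat < d.length ∧ q.toNat < D.length := by
    intro q hq
    obtain ⟨i, rfl, hd, hD⟩ := hmemf q hq
    simpa using ⟨hd, hD⟩
  have hget : ∀ q ∈ kf (shape1.zip shape2) 0,
      PySem.List.pyGet? d q = some (d.getD q.toNat "") ∧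
      PySem.List.pyGet? D q = some (D.getD q.toNat "") := by
    intro q hq
    obtain ⟨i, rfl, hd, hD⟩ := hmemf q hq
    constructor
    · simp [List.getElem?_eq_getElem hd, List.getD_eq_getElem?_getD]
    · simp [List.getElem?_eq_getElem hD, List.getD_eq_getElem?_getD]
  have hA := elemA_go_spec d D shape2 shape1 0 [] []
    (by omega) (by simpa using hb)
  simp only [Nat.cast_zero, List.drop_zero, List.nil_append] at hA
  have hlen4 : (kf (shape1.zip shape2) 0).length ≤ 4 := by
    rw [kf_length]; exact h3
  have hKB := kf_eq_filter_enumerate (shape1.zip shape2) 0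
  simp only [Nat.cast_zero] at hKB
  rw [elem_get_out_index, hA, Option.bind_some, elem_get_out_index_alt]
  simp only [hKB]
  rcases hKc : kf (shape1.zip shape2) 0 with - | ⟨a, - | ⟨b, - | ⟨c, - | ⟨e, - | ⟨f, tl⟩⟩⟩⟩⟩ <;>
    rw [hKc] at hget hlen4
  · simp [elemA_fmt]
  · have ha := hget a (by simp)
    simp only [ha.1, Option.bind_some]
    simp [elemA_fmt, elemB_horner, PySem.List.pyGet?, PySem.List.pyIdx?, List.getD_eq_getElem?_getD]
  · have ha := hget a (by simp)
    have hb' := hget b (by simp)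
    simp only [elemB_horner, ha.1, hb'.1, hb'.2, Option.bind_some]
    simp [elemA_fmt, PySem.List.pyGet?, PySem.List.pyIdx?, List.getD_eq_getElem?_getD,
      String.append_assoc]
  · have ha := hget a (by simp)
    have hb' := hget b (by simp)
    have hc' := hget c (by simp)
    simp only [elemB_horner, ha.1, hb'.1, hb'.2, hc'.1, hc'.2, Option.bind_some]
    simp [elemA_fmt, PySem.List.pyGet?, PySem.List.pyIdx?, List.getD_eq_getElem?_getD,
      String.append_assoc]
  · have ha := hget a (by simp)
    have hb' := hget b (by simp)
    have hc' := hget c (by simp)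
    have he' := hget e (by simp)
    simp only [elemB_horner, ha.1, hb'.1, hb'.2, hc'.1, hc'.2, he'.1, he'.2, Option.bind_some]
    simp [elemA_fmt, PySem.List.pyGet?, PySem.List.pyIdx?, List.getD_eq_getElem?_getD,
      String.append_assoc, str_merge_paren]
  · exfalso; simp at hlen4; omega
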